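-- pv_equiv track=rewrite | github.com/Sidhant185/Python_Practice | Session-4/Q16.py | maxConveyorShifts
-- ===== SOURCE A (Python) =====
-- def maxConveyorShifts(s):
--     """
--     Count movement of zeros when between ones
--     For each 0 between 1s, count how many 1s are to its left
--     Time Complexity: O(n)
--     Space Complexity: O(1)
--     """
--     res = 0
--     ones = 0  # Count of 1s seen so far
--
--     # Iterate through string
--     for i in range(len(s)):
--         if s[i] == '1':
--             # Increment count of ones
--             ones += 1
--         # If current is 0 and there's a 1 before it
--         elif i > 0 and s[i-1] == '1':
--             # Add count of ones to result
--             res += ones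
--
--     return res
-- ===== SOURCE B (Python) =====
-- def maxConveyorShifts(s):
--     """Run-based rewrite: walk maximal runs of equal characters; each non-ones
--     run immediately preceded by a ones-run contributes the cumulative ones count once."""
--     res = 0
--     ones = 0
--     prev_ones = False
--     i = 0
--     n = len(s)
--     while i < n:
--         j = i
--         while j < n and s[j] == s[i]:
--             j += 1
--         if s[i] == '1':
--             ones += j - i
--             prev_ones = True
--         else:
--             if prev_ones:
--                 res += ones
--             prev_ones = False
--         i = j
--     return res
-- ===== Notes on version B (the rewrite author's own statement) =====
-- stated objective: alternative
-- what changed: Iterates over maximal runs of equal characters with a flag recording whether the previous run consisted of ones, adding the cumulative ones count once per ones-run boundary, instead of A's per-character scan that re-checks s[i-1].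
import Mathlib
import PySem

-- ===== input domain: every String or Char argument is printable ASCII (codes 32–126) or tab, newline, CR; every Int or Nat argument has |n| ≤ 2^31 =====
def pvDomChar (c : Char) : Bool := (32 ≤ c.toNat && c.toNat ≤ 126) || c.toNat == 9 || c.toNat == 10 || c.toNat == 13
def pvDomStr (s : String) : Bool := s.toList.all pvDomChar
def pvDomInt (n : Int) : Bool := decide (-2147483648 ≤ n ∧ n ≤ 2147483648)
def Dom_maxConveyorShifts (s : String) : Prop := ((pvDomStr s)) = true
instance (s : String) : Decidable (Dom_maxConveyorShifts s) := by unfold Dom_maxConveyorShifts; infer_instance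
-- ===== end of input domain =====

-- B iterates over maximal runs of equal characters instead of single characters; same O(n), different decomposition.

-- ===== PORT A =====
-- A's loop over i in range(len(s)); 'i > 0 and s[i-1] == "1"' is carried as the previous character (none at i = 0).
def maxConveyorShiftsGo : List Char → Option Char → Int → Int → Int
  | [], _, _, res => res
  | c :: cs, prev, ones, res =>
    if c = '1' then maxConveyorShiftsGo cs (some c) (ones + 1) res
    else if prev = some '1' then maxConveyorShiftsGo cs (some c) ones (res + ones)
    else maxConveyorShiftsGo cs (some c) ones res

def maxConveyorShifts (s : String) : Int := maxConveyorShiftsGo s.toList none 0 0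

-- ===== PORT B =====
-- inner while loop of Source B: split off the maximal run of characters equal to the first one
def altRuns : List Char → List (Char × Nat)
  | [] => []
  | c :: cs =>
    (c, (cs.takeWhile (fun d => d = c)).length + 1) :: altRuns (cs.dropWhile (fun d => d = c))
  termination_by l => l.length
  decreasing_by simpa using Nat.lt_succ_of_le (List.length_dropWhile_le _ _)

-- outer loop of Source B over the runs, with state (ones, prev_ones, res)
def altGo : List (Char × Nat) → Int → Bool → Int → Int
  | [], _, _, res => res
  | (c, k) :: rs, ones, flag, res =>
    if c = '1' then altGo rs (ones + (k : Int)) true res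
    else altGo rs ones false (if flag then res + ones else res)

def maxConveyorShifts_alt (s : String) : Int := altGo (altRuns s.toList) 0 false 0

-- ===== PRECONDITION & SPEC =====
def Spec_maxConveyorShifts (s : String) (out : Int) : Prop := out = maxConveyorShifts_alt s
instance (s : String) (out : Int) : Decidable (Spec_maxConveyorShifts s out) := by unfold Spec_maxConveyorShifts; infer_instance

-- ===== CLAIM (what is proved, stated in full; the proofs are below) =====
def Claim_equal_maxConveyorShifts : Prop := ∀ (s : String), Dom_maxConveyorShifts s → Spec_maxConveyorShifts s (maxConveyorShifts s)

-- ===== LEMMAS AND PROOFS =====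

-- A consumes a nonempty all-'1' run by adding its length to ones and ending with prev = '1'.
lemma goA_ones_run (t : List Char) (rest : List Char) (prev : Option Char) (ones res : Int)
    (h : ∀ x ∈ t, x = '1') (hne : t ≠ []) :
    maxConveyorShiftsGo (t ++ rest) prev ones res
      = maxConveyorShiftsGo rest (some '1') (ones + (t.length : Int)) res := by
  induction t generalizing prev ones with
  | nil => exact absurd rfl hne
  | cons a t' ih =>
    have ha : a = '1' := h a (by simp)
    subst ha
    simp only [List.cons_append, maxConveyorShiftsGo]
    cases t' with
    | nil => simp
    | cons b t'' =>
      rw [ih (some '1') (ones + 1) (fun x hx => h x (List.mem_cons_of_mem _ hx)) (by simp)]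
      simp only [List.length_cons]
      push_cast
      ring_nf

-- A passes over the tail of a non-'1' run without touching res (prev stays c ≠ '1').
lemma goA_skip (t : List Char) (rest : List Char) (c : Char) (ones res : Int)
    (hc : c ≠ '1') (h : ∀ x ∈ t, x = c) :
    maxConveyorShiftsGo (t ++ rest) (some c) ones res
      = maxConveyorShiftsGo rest (some c) ones res := by
  induction t with
  | nil => rfl
  | cons a t' ih =>
    have ha : a = c := h a (by simp)
    subst ha
    simp only [List.cons_append, maxConveyorShiftsGo, if_neg hc]
    rw [if_neg (by simpa using hc)]
    exact ih (fun x hx => h x (List.mem_cons_of_mem _ hx))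

-- A consumes a whole non-'1' run: res grows by ones iff the previous character was '1'.
lemma goA_nonone_run (c : Char) (t : List Char) (rest : List Char) (prev : Option Char)
    (ones res : Int) (hc : c ≠ '1') (h : ∀ x ∈ t, x = c) :
    maxConveyorShiftsGo (c :: t ++ rest) prev ones res
      = maxConveyorShiftsGo rest (some c) ones (if prev = some '1' then res + ones else res) := by
  simp only [List.cons_append, maxConveyorShiftsGo, if_neg hc]
  by_cases hp : prev = some '1'
  · rw [if_pos hp, if_pos hp, goA_skip t rest c ones (res + ones) hc h]
  · rw [if_neg hp, if_neg hp, goA_skip t rest c ones res hc h]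

-- Main invariant: A's character loop equals B's run loop, the flag recording whether the previous character was '1'.
lemma go_eq_altGo (n : Nat) : ∀ (l : List Char), l.length ≤ n → ∀ (prev : Option Char) (ones res : Int),
    maxConveyorShiftsGo l prev ones res
      = altGo (altRuns l) ones (decide (prev = some '1')) res := by
  induction n with
  | zero =>
    intro l hl prev ones res
    have : l = [] := List.eq_nil_of_length_eq_zero (Nat.le_zero.mp hl)
    subst this
    simp [altRuns, maxConveyorShiftsGo, altGo]
  | succ n ih =>
    intro l hl prev ones res
    cases l with
    | nil => simp [altRuns, maxConveyorShiftsGo, altGo]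
    | cons c cs =>
      have hsplit : cs.takeWhile (fun d => d = c) ++ cs.dropWhile (fun d => d = c) = cs :=
        List.takeWhile_append_dropWhile
      have hmem : ∀ x ∈ cs.takeWhile (fun d => d = c), x = c := by
        intro x hx
        simpa using List.mem_takeWhile_imp hx
      have hlen : (cs.dropWhile (fun d => d = c)).length ≤ n := by
        have := List.length_dropWhile_le (fun d => d = c) cs
        simp at hl
        omega
      rw [show altRuns (c :: cs)
            = (c, (cs.takeWhile (fun d => d = c)).length + 1)
              :: altRuns (cs.dropWhile (fun d => d = c)) from by rw [altRuns]]
      by_cases hc : c = '1'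
      · subst hc
        have := goA_ones_run ('1' :: cs.takeWhile (fun d => d = '1'))
            (cs.dropWhile (fun d => d = '1')) prev ones res
            (by intro x hx
                rcases List.mem_cons.mp hx with h | h
                · exact h
                · exact hmem x h) (by simp)
        rw [show ('1' :: cs.takeWhile (fun d => d = '1')) ++ cs.dropWhile (fun d => d = '1')
              = '1' :: cs from by rw [List.cons_append, hsplit]] at this
        rw [this, ih _ hlen]
        simp only [altGo, List.length_cons]
        push_cast
        ring_nf
        simp
      · rw [show (c :: cs) = c :: cs.takeWhile (fun d => d = c)
              ++ cs.dropWhile (fun d => d = c) from by rw [List.cons_append, hsplit]]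
        rw [goA_nonone_run c _ _ prev ones res hc hmem, ih _ hlen]
        simp only [altGo, if_neg hc]
        congr 1
        · simp [hc]
        · by_cases hp : prev = some '1' <;> simp [hp]

-- ===== VERDICT (by name: the statement is the Claim_ definition above) =====
theorem maxConveyorShifts_spec : Claim_equal_maxConveyorShifts := by
  intro s _
  unfold Spec_maxConveyorShifts maxConveyorShifts maxConveyorShifts_alt
  rw [go_eq_altGo s.toList.length s.toList le_rfl]
  rfl
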